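-- pv_equiv track=rewrite | github.com/pololee/oj-leetcode | zhaoyu/EvenSubarray.py | subarrays
-- ===== SOURCE A (Python) =====
-- def subarrays(nums, k):
--     """
--     :type nums: list[int]
--     :type k: int
--     :rtype list[list[int]]
--     """
--     if not nums:
--         return []
--
--     size = len(nums)
--     nums_str = ''.join([str(x) for x in nums])
--     substr_set = set()
--     for i in range(size):
--         odds = 0
--
--         for j in range(i, size):
--             if nums[j] % 2 == 1:
--                 odds += 1
--
--             if odds <= k and nums_str[i:j+1] not in substr_set:
--                 substr_set.add(nums_str[i:j+1])
--     return len(substr_set)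
-- ===== SOURCE B (Python) =====
-- def subarrays(nums, k):
--     """
--     :type nums: list[int]
--     :type k: int
--     :rtype: int
--     """
--     s = ''.join(str(x) for x in nums)
--     n = len(nums)
--     seen = set()
--     odds = 0
--     j = 0  # two-pointer right end (exclusive); never moves backwards
--     for i in range(n):
--         if j < i:
--             j = i
--         while j < n and odds + nums[j] % 2 <= k:
--             odds += nums[j] % 2
--             j += 1
--         for e in range(i, j):
--             seen.add(s[i:e + 1])
--         if j > i:
--             odds -= nums[i] % 2
--     return len(seen)
-- ===== Notes on version B (the rewrite author's own statement) =====
-- stated objective: faster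
-- what changed: Replaced A's O(n^2)-iteration nested scan (which recomputes the odd-counter for every start and keeps scanning after the budget k is exhausted, with a redundant membership test before each set insert) by a single two-pointer sliding window over a prefix odd-count: the right end never moves backwards, so only the valid subarray ends are ever visited and sliced.
-- outside the precondition, e.g. on subarrays([], 0): A returns [], B returns 0
import Mathlib
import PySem

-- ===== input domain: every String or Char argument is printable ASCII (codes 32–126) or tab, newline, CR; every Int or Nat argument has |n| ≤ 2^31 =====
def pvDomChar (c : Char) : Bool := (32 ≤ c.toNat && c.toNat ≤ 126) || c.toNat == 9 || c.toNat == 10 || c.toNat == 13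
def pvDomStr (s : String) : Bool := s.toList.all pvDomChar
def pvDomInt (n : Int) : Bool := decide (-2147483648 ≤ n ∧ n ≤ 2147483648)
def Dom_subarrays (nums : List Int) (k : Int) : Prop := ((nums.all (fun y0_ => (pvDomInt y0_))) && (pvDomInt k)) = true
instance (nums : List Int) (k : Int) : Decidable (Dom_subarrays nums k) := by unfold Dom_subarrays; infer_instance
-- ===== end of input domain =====

-- B replaces A's restart-from-scratch nested scan by a single two-pointer sliding window
-- over the running odd-count, visiting only the valid subarray ends (objective: faster).


-- ===== PORT A =====
-- inner-loop body of A: odds update, then the guarded insertion of nums_str[i:j+1]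
def subarraysStep (nums : List Int) (k : Int) (numsStr : List Char) (i : Int)
    (st : Int × PySem.Set (List Char)) (j : Int) : Int × PySem.Set (List Char) :=
  let odds := if PySem.Int.mod (PySem.List.pyGetD nums j 0) 2 = 1 then st.1 + 1 else st.1
  let sl := PySem.List.slice numsStr (some i) (some (j + 1))
  (odds, if odds ≤ k ∧ st.2.contains sl = false then st.2.add sl else st.2)

def subarrays (nums : List Int) (k : Int) : Int :=
  -- on nums = [] Python A returns the LIST [] (not an int); Pre_subarrays excludes that input
  if nums = [] then 0
  else
    let size : Int := (nums.length : Int)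
    let numsStr : List Char := PySem.Chars.join [] (nums.map PySem.Int.toChars)
    let substrSet : PySem.Set (List Char) :=
      (PySem.List.pyRange 0 size).foldl
        (fun acc i => ((PySem.List.pyRange i size).foldl (subarraysStep nums k numsStr i) (0, acc)).2)
        PySem.Set.empty
    PySem.Set.len substrSet

-- ===== PORT B =====
-- the 'while j < n and odds + nums[j] % 2 <= k' loop of Source B
def subarraysAltExtend (nums : List Int) (k : Int) (n : Nat) (odds : Int) (j : Nat) : Int × Nat :=
  if h : j < n ∧ odds + PySem.Int.mod (PySem.List.pyGetD nums (j : Int) 0) 2 ≤ k then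
    subarraysAltExtend nums k n (odds + PySem.Int.mod (PySem.List.pyGetD nums (j : Int) 0) 2) (j + 1)
  else (odds, j)
termination_by n - j
decreasing_by omega

-- body of Source B's 'for i in range(n)' loop; state = (seen, odds, j)
def subarraysAltStep (nums : List Int) (k : Int) (s : List Char)
    (st : PySem.Set (List Char) × Int × Nat) (i : Nat) : PySem.Set (List Char) × Int × Nat :=
  let j0 := if st.2.2 < i then i else st.2.2
  let r := subarraysAltExtend nums k nums.length st.2.1 j0
  let seen := (List.range' i (r.2 - i)).foldl
      (fun seen e => seen.add (PySem.List.slice s (some (i : Int)) (some ((e : Int) + 1)))) st.1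
  let odds2 := if i < r.2 then r.1 - PySem.Int.mod (PySem.List.pyGetD nums (i : Int) 0) 2 else r.1
  (seen, odds2, r.2)

def subarrays_alt (nums : List Int) (k : Int) : Int :=
  let s : List Char := PySem.Chars.join [] (nums.map PySem.Int.toChars)
  let st := (List.range nums.length).foldl (subarraysAltStep nums k s) (PySem.Set.empty, 0, 0)
  PySem.Set.len st.1

-- ===== PRECONDITION & SPEC =====
-- Pre_ excludes only nums = [], where A returns the empty LIST [] instead of an int
-- (not a value of the declared return type); B returns 0 there.
def Pre_subarrays (nums : List Int) (k : Int) : Prop := nums ≠ []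
instance (nums : List Int) (k : Int) : Decidable (Pre_subarrays nums k) := by unfold Pre_subarrays; infer_instance
def pvWitness_subarrays : List Int × Int := ([1, 2], 1)

def Spec_subarrays (nums : List Int) (k : Int) (out : Int) : Prop := out = subarrays_alt nums k
instance (nums : List Int) (k : Int) (out : Int) : Decidable (Spec_subarrays nums k out) := by unfold Spec_subarrays; infer_instance

-- ===== CLAIM (what is proved, stated in full; the proofs are below) =====
def Claim_equal_subarrays : Prop := ∀ (nums : List Int) (k : Int), Dom_subarrays nums k → Pre_subarrays nums k → Spec_subarrays nums k (subarrays nums k)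

-- ===== LEMMAS AND PROOFS =====

-- odd-count (as a sum of x % 2 ∈ {0,1}) of nums[i:j)
def wc (nums : List Int) (i j : Nat) : Int :=
  ((List.range' i (j - i)).map (fun t => PySem.Int.mod (nums.getD t 0) 2)).sum

theorem wc_self (nums : List Int) (i : Nat) : wc nums i i = 0 := by
  simp [wc]

theorem wc_succ (nums : List Int) (i j : Nat) (h : i ≤ j) :
    wc nums i (j + 1) = wc nums i j + PySem.Int.mod (nums.getD j 0) 2 := by
  have h1 : j + 1 - i = (j - i) + 1 := by omega
  have h2 : i + 1 * (j - i) = j := by omega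
  rw [wc, h1, List.range'_concat, h2]
  simp [wc]

theorem wc_left (nums : List Int) (i j : Nat) (h : i < j) :
    wc nums i j = PySem.Int.mod (nums.getD i 0) 2 + wc nums (i + 1) j := by
  have h1 : j - i = (j - (i + 1)) + 1 := by omega
  rw [wc, h1, List.range'_succ]
  simp [wc]

theorem wc_nonneg (nums : List Int) (i j : Nat) : 0 ≤ wc nums i j := by
  apply List.sum_nonneg
  intro x hx
  simp only [List.mem_map] at hx
  obtain ⟨t, -, rfl⟩ := hx
  exact PySem.Int.mod_nonneg _ (by norm_num)

theorem wc_mono (nums : List Int) (i j j' : Nat) (h : j ≤ j') :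
    wc nums i j ≤ wc nums i j' := by
  by_cases hji : j ≤ i
  · rw [wc, Nat.sub_eq_zero_of_le hji]
    simpa using wc_nonneg nums i j'
  · have h2 : (j - i) + (j' - j) = j' - i := by omega
    have h3 : i + 1 * (j - i) = j := by omega
    have key : wc nums i j' = wc nums i j +
        ((List.range' j (j' - j)).map (fun t => PySem.Int.mod (nums.getD t 0) 2)).sum := by
      simp only [wc]
      rw [← h2, ← List.range'_append, h3, List.map_append, List.sum_append]
    have hpos : 0 ≤ ((List.range' j (j' - j)).map (fun t => PySem.Int.mod (nums.getD t 0) 2)).sum := by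
      apply List.sum_nonneg
      intro x hx
      simp only [List.mem_map] at hx
      obtain ⟨t, -, rfl⟩ := hx
      exact PySem.Int.mod_nonneg _ (by norm_num)
    omega

-- spec of the while-loop: it advances j to the maximal valid window end
theorem extend_spec (nums : List Int) (k : Int) :
    ∀ (fuel i j : Nat) (odds : Int), nums.length - j ≤ fuel → i ≤ j → j ≤ nums.length →
      odds = wc nums i j → (i < j → odds ≤ k) →
      j ≤ (subarraysAltExtend nums k nums.length odds j).2 ∧
      (subarraysAltExtend nums k nums.length odds j).2 ≤ nums.length ∧
      (subarraysAltExtend nums k nums.length odds j).1 = wc nums i (subarraysAltExtend nums k nums.length odds j).2 ∧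
      (i < (subarraysAltExtend nums k nums.length odds j).2 → (subarraysAltExtend nums k nums.length odds j).1 ≤ k) ∧
      ((subarraysAltExtend nums k nums.length odds j).2 < nums.length →
        k < wc nums i ((subarraysAltExtend nums k nums.length odds j).2 + 1)) := by
  intro fuel
  induction fuel with
  | zero =>
    intro i j odds hf hij hjn ho hk
    have hne : ¬ (j < nums.length ∧ odds + PySem.Int.mod (PySem.List.pyGetD nums (j : Int) 0) 2 ≤ k) := by
      intro hc
      omega
    rw [subarraysAltExtend, dif_neg hne]
    exact ⟨le_refl j, hjn, ho, hk, by intro h; omega⟩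
  | succ m ih =>
    intro i j odds hf hij hjn ho hk
    rw [subarraysAltExtend]
    by_cases hc : j < nums.length ∧ odds + PySem.Int.mod (PySem.List.pyGetD nums (j : Int) 0) 2 ≤ k
    · rw [dif_pos hc]
      have hg : PySem.List.pyGetD nums (j : Int) 0 = nums.getD j 0 := PySem.List.pyGetD_natCast ..
      have ho' : odds + PySem.Int.mod (PySem.List.pyGetD nums (j : Int) 0) 2 = wc nums i (j + 1) := by
        rw [hg, wc_succ nums i j hij, ho]
      have IH := ih i (j + 1) _ (by omega) (by omega) (by omega) ho' (fun _ => hc.2)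
      exact ⟨Nat.le_of_succ_le IH.1, IH.2.1, IH.2.2.1, IH.2.2.2.1, IH.2.2.2.2⟩
    · rw [dif_neg hc]
      refine ⟨le_refl j, hjn, ho, hk, ?_⟩
      intro hjlt
      have hg : PySem.List.pyGetD nums (j : Int) 0 = nums.getD j 0 := PySem.List.pyGetD_natCast ..
      have h2 : k < odds + PySem.Int.mod (PySem.List.pyGetD nums (j : Int) 0) 2 := by
        by_contra hle
        exact hc ⟨hjlt, by omega⟩
      rw [wc_succ nums i j hij, ← ho, ← hg]
      omega

-- a filter over a range that is true exactly on a prefix IS the shorter range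
theorem filter_range'_prefix (p : Nat → Bool) :
    ∀ (len a m : Nat), m ≤ len →
      (∀ x, a ≤ x → x < a + m → p x = true) →
      (∀ x, a + m ≤ x → x < a + len → p x = false) →
      (List.range' a len).filter p = List.range' a m := by
  intro len
  induction len with
  | zero =>
    intro a m hm _ _
    have : m = 0 := by omega
    simp [this]
  | succ l ih =>
    intro a m hm h1 h2
    rw [List.range'_succ, List.filter_cons]
    cases m with
    | zero =>
      rw [h2 a (by omega) (by omega)]
      simp only [Bool.false_eq_true, if_false]
      rw [ih (a + 1) 0 (by omega) (fun x hx1 hx2 => by omega)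
          (fun x hx1 hx2 => h2 x (by omega) (by omega))]
      simp
    | succ m' =>
      rw [h1 a (by omega) (by omega)]
      simp only [if_pos]
      rw [List.range'_succ]
      congr 1
      exact ih (a + 1) m' (by omega) (fun x hx1 hx2 => h1 x (by omega) (by omega))
        (fun x hx1 hx2 => h2 x (by omega) (by omega))

-- collapse A's membership-guarded insert to a plain conditional Set.add
theorem add_guard (s : PySem.Set (List Char)) (x : List Char) (c : Prop) [Decidable c] :
    (if c ∧ s.contains x = false then s.add x else s) = (if c then s.add x else s) := by
  by_cases hc : c
  · by_cases hx : s.contains x = true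
    · have hmem : x ∈ s := by simpa using hx
      have ha : s.add x = s := by unfold PySem.Set.add; rw [if_pos hx]
      rw [if_neg (fun h => by simp [hmem] at h), if_pos hc, ha]
    · have hx' : s.contains x = false := by simpa using hx
      rw [if_pos ⟨hc, hx'⟩, if_pos hc]
  · rw [if_neg (fun h => hc h.1), if_neg hc]

theorem A_inner (nums : List Int) (k : Int) (S : List Char) (i : Nat) :
    ∀ (fuel j0 : Nat) (acc : PySem.Set (List Char)), nums.length - j0 ≤ fuel → i ≤ j0 → j0 ≤ nums.length →
      ((PySem.List.pyRange (j0 : Int) (nums.length : Int)).foldl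
          (subarraysStep nums k S (i : Int)) (wc nums i j0, acc)).2
        = ((List.range' j0 (nums.length - j0)).filter (fun j => decide (wc nums i (j + 1) ≤ k))).foldl
            (fun acc j => acc.add (PySem.List.slice S (some (i : Int)) (some ((j : Int) + 1)))) acc := by
  intro fuel
  induction fuel with
  | zero =>
    intro j0 acc hf hij hjn
    have hj : j0 = nums.length := by omega
    have hnil : PySem.List.pyRange (j0 : Int) (nums.length : Int) = [] := by
      rw [List.eq_nil_iff_forall_not_mem]
      intro x hx
      rw [PySem.List.mem_pyRange_one] at hx
      omega
    rw [hnil, hj]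
    simp
  | succ m ih =>
    intro j0 acc hf hij hjn
    by_cases hlt : j0 < nums.length
    · have hcons : PySem.List.pyRange (j0 : Int) (nums.length : Int)
          = (j0 : Int) :: PySem.List.pyRange ((j0 : Int) + 1) (nums.length : Int) :=
        PySem.List.pyRange_one_cons (by exact_mod_cast hlt)
      have hodds : (if PySem.Int.mod (nums.getD j0 0) 2 = 1 then wc nums i j0 + 1 else wc nums i j0)
          = wc nums i (j0 + 1) := by
        rcases PySem.Int.mod_two_eq (nums.getD j0 0) with h0 | h1
        · rw [if_neg (by omega), wc_succ nums i j0 hij, h0, add_zero]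
        · rw [if_pos h1, wc_succ nums i j0 hij, h1]
      have hstep : subarraysStep nums k S (i : Int) (wc nums i j0, acc) (j0 : Int)
          = (wc nums i (j0 + 1),
             if wc nums i (j0 + 1) ≤ k then
               acc.add (PySem.List.slice S (some (i : Int)) (some ((j0 : Int) + 1)))
             else acc) := by
        simp only [subarraysStep, PySem.List.pyGetD_natCast]
        rw [hodds, add_guard]
      have hcast : ((j0 : Int) + 1) = (((j0 + 1 : Nat)) : Int) := by push_cast; ring
      have hlen : nums.length - j0 = (nums.length - (j0 + 1)) + 1 := by omega
      rw [hcons, List.foldl_cons, hstep, hcast, hlen, List.range'_succ, List.filter_cons]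
      by_cases hk2 : wc nums i (j0 + 1) ≤ k
      · simp only [if_pos hk2, if_pos (decide_eq_true hk2), List.foldl_cons]
        rw [ih (j0 + 1) _ (by omega) (by omega) (by omega)]
        norm_cast
      · simp only [if_neg hk2, if_neg (fun h => hk2 (of_decide_eq_true h))]
        rw [ih (j0 + 1) _ (by omega) (by omega) (by omega)]
    · have hj : j0 = nums.length := by omega
      have hnil : PySem.List.pyRange (j0 : Int) (nums.length : Int) = [] := by
        rw [List.eq_nil_iff_forall_not_mem]
        intro x hx
        rw [PySem.List.mem_pyRange_one] at hx
        omega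
      rw [hnil, hj]
      simp

-- the main loop correspondence, with the two-pointer invariant carried along
theorem outer (nums : List Int) (k : Int) (S : List Char) :
    ∀ (len i : Nat) (odds : Int) (j : Nat) (acc : PySem.Set (List Char)),
      i + len = nums.length → j ≤ nums.length →
      odds = wc nums i (max i j) → (i < j → odds ≤ k) →
      (List.range' i len).foldl
          (fun acc (i : Nat) =>
            ((PySem.List.pyRange (i : Int) (nums.length : Int)).foldl
                (subarraysStep nums k S (i : Int)) (0, acc)).2) acc
        = ((List.range' i len).foldl (subarraysAltStep nums k S) (acc, odds, j)).1 := by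
  intro len
  induction len with
  | zero =>
    intro i odds j acc _ _ _ _
    simp
  | succ l ih =>
    intro i odds j acc hlen hjn ho hk
    have hin : i < nums.length := by omega
    have hij0 : i ≤ max i j := le_max_left i j
    have hj0n : max i j ≤ nums.length := by omega
    have hk0 : i < max i j → odds ≤ k := by
      intro h
      rcases Nat.lt_or_ge i j with h' | h'
      · exact hk h'
      · omega
    have E := extend_spec nums k nums.length i (max i j) odds (by omega) hij0 hj0n ho hk0
    set r := subarraysAltExtend nums k nums.length odds (max i j) with hr
    obtain ⟨E1, E2, E3, E4, E5⟩ := E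
    have hfil : (List.range' i (nums.length - i)).filter (fun j => decide (wc nums i (j + 1) ≤ k))
        = List.range' i (r.2 - i) := by
      have him : i + (r.2 - i) = r.2 := by omega
      apply filter_range'_prefix
      · omega
      · intro x hx1 hx2
        have hxr := wc_mono nums i (x + 1) r.2 (by omega)
        have hE4 := E4 (by omega)
        rw [E3] at hE4
        simp only [decide_eq_true_eq]
        omega
      · intro x hx1 hx2
        have hE5 := E5 (by omega)
        have hxr := wc_mono nums i (r.2 + 1) (x + 1) (by omega)
        simp only [decide_eq_false_iff_not]
        omega
    have hA := A_inner nums k S i nums.length i acc (by omega) (le_refl i) (by omega)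
    rw [wc_self] at hA
    have hBj0 : (if j < i then i else j) = max i j := by
      rcases Nat.lt_or_ge j i with h | h
      · rw [if_pos h]; omega
      · rw [if_neg (by omega)]; omega
    have hB : subarraysAltStep nums k S (acc, odds, j) i
        = ((List.range' i (r.2 - i)).foldl
            (fun seen e => seen.add (PySem.List.slice S (some (i : Int)) (some ((e : Int) + 1)))) acc,
           (if i < r.2 then r.1 - PySem.Int.mod (nums.getD i 0) 2 else r.1), r.2) := by
      simp only [subarraysAltStep, PySem.List.pyGetD_natCast, hBj0, ← hr]
    rw [List.range'_succ]
    simp only [List.foldl_cons]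
    rw [hB, hA, hfil]
    set odds2 := if i < r.2 then r.1 - PySem.Int.mod (nums.getD i 0) 2 else r.1 with ho2
    have hmodnn : 0 ≤ PySem.Int.mod (nums.getD i 0) 2 := PySem.Int.mod_nonneg _ (by norm_num)
    have ho2' : odds2 = wc nums (i + 1) (max (i + 1) r.2) := by
      rcases Nat.lt_or_ge i r.2 with h | h
      · rw [ho2, if_pos h, E3]
        rcases Nat.lt_or_ge (i + 1) r.2 with h2 | h2
        · rw [Nat.max_eq_right (by omega), wc_left nums i r.2 h]
          ring
        · have hr2 : r.2 = i + 1 := by omega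
          rw [Nat.max_eq_left (by omega), hr2, wc_succ nums i i (le_refl i), wc_self, wc_self]
          ring
      · have hr2 : r.2 = i := by omega
        rw [ho2, if_neg (by omega), E3, hr2, wc_self, Nat.max_eq_left (by omega), wc_self]
    have hk2 : i + 1 < r.2 → odds2 ≤ k := by
      intro h
      have h1 : i < r.2 := by omega
      have hwl := wc_left nums i r.2 h1
      have hE4 := E4 h1
      rw [E3] at hE4
      rw [ho2', Nat.max_eq_right (by omega)]
      omega
    exact ih (i + 1) odds2 r.2 _ (by omega) E2 ho2' hk2

-- ===== VERDICT (by name: the statement is the Claim_ definition above) =====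
theorem subarrays_spec : Claim_equal_subarrays := by
  intro nums k _hdom hpre
  have h := outer nums k (PySem.Chars.join [] (nums.map PySem.Int.toChars))
      nums.length 0 0 0 PySem.Set.empty (by omega) (by omega) (by simp [wc_self]) (by omega)
  simp only [Spec_subarrays, subarrays, subarrays_alt, if_neg hpre]
  refine congrArg PySem.Set.len ?_
  rw [PySem.List.pyRange_zero_natCast, List.foldl_map, List.range_eq_range']
  exact h
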